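-- pv_equiv track=rewrite | github.com/mi-ph/advent-2020 | 17-conway-cubes/program.py | conway
-- ===== SOURCE A (Python) =====
-- def neighbours(square):
--     neighbours = [tuple()]
--     dims = len(square)
--     for dim in range(dims):
--         for neighbour in neighbours.copy():
--             neighbours.remove(neighbour)
--             for i in range(square[dim]-1, square[dim]+2):
--                 neighbours.append(neighbour + (i,))
--     neighbours.remove(square)
--     return neighbours
--
-- def numNeighbours(square, active):
--     n = 0
--     for neighbour in neighbours(square):
--         if neighbour in active:
--             n += 1
--     return n
--
-- def conway(activeSquares, iterations):
--     for _ in range(iterations):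
--         nextActiveSquares = set()
--         for square in activeSquares:
--             n = numNeighbours(square, activeSquares)
--             if n == 2 or n == 3:
--                 nextActiveSquares.add(square)
--             for neighbour in neighbours(square):
--                 n = numNeighbours(neighbour, activeSquares)
--                 if n == 3:
--                     nextActiveSquares.add(neighbour)
--         activeSquares = nextActiveSquares.copy()
--     return len(activeSquares)
-- ===== SOURCE B (Python) =====
-- # One counting pass per generation: a dict accumulates, for every cell, how many
-- # active neighbours it has; the rules are then applied once to the counted cells.
-- def _cells(square):
--     cells = [()]
--     for c in square:
--         cells = [p + (i,) for p in cells for i in (c - 1, c, c + 1)]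
--     return cells
--
-- def conway(activeSquares, iterations):
--     active = {tuple(s) for s in activeSquares}
--     for _ in range(iterations):
--         counts = {}
--         for sq in active:
--             for nb in _cells(sq):
--                 if nb != sq:
--                     counts[nb] = counts.get(nb, 0) + 1
--         active = {sq for sq, n in counts.items() if n == 3 or (n == 2 and sq in active)}
--     return len(active)
-- ===== Notes on version B (the rewrite author's own statement) =====
-- stated objective: faster
-- what changed: Instead of recomputing numNeighbours (a scan of the whole active set for each of the 3^d neighbours) for every active cell and again for every neighbour of every active cell, B makes one pass per generation that accumulates each cell's active-neighbour count in a dict and then applies the birth/survival rules once to the counted cells.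
import Mathlib
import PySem

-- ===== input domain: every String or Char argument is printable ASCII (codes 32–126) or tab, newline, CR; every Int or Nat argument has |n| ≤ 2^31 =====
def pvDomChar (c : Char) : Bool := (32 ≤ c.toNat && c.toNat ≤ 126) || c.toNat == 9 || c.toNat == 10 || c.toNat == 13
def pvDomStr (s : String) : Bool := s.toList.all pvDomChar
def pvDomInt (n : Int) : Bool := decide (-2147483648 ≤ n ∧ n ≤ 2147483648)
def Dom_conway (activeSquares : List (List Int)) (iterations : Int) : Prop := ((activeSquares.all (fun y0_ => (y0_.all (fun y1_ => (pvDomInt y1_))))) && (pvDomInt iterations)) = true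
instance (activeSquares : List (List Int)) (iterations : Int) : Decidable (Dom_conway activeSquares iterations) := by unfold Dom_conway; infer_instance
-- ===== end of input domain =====

-- B replaces A's per-cell rescans of the active set with one dict pass per
-- generation that accumulates every cell's active-neighbour count, then applies
-- the rules once; equivalence of the returned count is proved for distinct cells.


-- ===== PORT A =====
-- neighbours(square): per-dimension rebuild of the neighbour list (remove each
-- entry, append its three extensions), then remove the cell itself.
def nbrsA (square : List Int) : List (List Int) :=
  let nbs : List (List Int) := [[]]
  let dims : Int := (square.length : Int)
  let nbs := (PySem.List.pyRange 0 dims 1).foldl (fun nbs dim =>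
    nbs.foldl (fun cur nb =>
      let cur := (PySem.List.remove? cur nb).getD cur        -- nb is always present here
      let c := PySem.List.pyGetD square dim 0                -- square[dim]; dim is in range
      cur ++ (PySem.List.pyRange (c - 1) (c + 2) 1).map (fun i => nb ++ [i])) nbs) nbs
  (PySem.List.remove? nbs square).getD nbs                   -- square is always present

def numNbrsA (square : List Int) (active : List (List Int)) : Int :=
  (nbrsA square).foldl (fun n nb => if nb ∈ active then n + 1 else n) 0

def stepA (active : List (List Int)) : PySem.Set (List Int) :=
  active.foldl (fun next square =>
    let n := numNbrsA square active
    let next := if n = 2 ∨ n = 3 then PySem.Set.add next square else next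
    (nbrsA square).foldl (fun next nb =>
      if numNbrsA nb active = 3 then PySem.Set.add next nb else next) next)
    PySem.Set.empty

def loopA : Nat → List (List Int) → List (List Int)
  | 0, a => a
  | n + 1, a => loopA n (stepA a)

def conway (activeSquares : List (List Int)) (iterations : Int) : Int :=
  (loopA iterations.toNat activeSquares).length

-- ===== PORT B =====
def cellsB (square : List Int) : List (List Int) :=
  square.foldl
    (fun cells c => cells.flatMap (fun p => [c - 1, c, c + 1].map (fun i => p ++ [i])))
    [[]]

def stepB (active : List (List Int)) : PySem.Set (List Int) :=
  let counts := active.foldl (fun counts sq =>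
    (cellsB sq).foldl (fun counts nb =>
      if nb ≠ sq then counts.insert nb (counts.getD nb 0 + 1) else counts) counts)
    (PySem.Dict.empty : PySem.Dict (List Int) Int)
  counts.items.foldl (fun s kv =>
    if kv.2 = 3 ∨ (kv.2 = 2 ∧ kv.1 ∈ active) then PySem.Set.add s kv.1 else s)
    PySem.Set.empty

def loopB : Nat → List (List Int) → List (List Int)
  | 0, a => a
  | n + 1, a => loopB n (stepB a)

def conway_alt (activeSquares : List (List Int)) (iterations : Int) : Int :=
  (loopB iterations.toNat (PySem.Set.ofList activeSquares)).length

-- ===== PRECONDITION & SPEC =====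
-- activeSquares is a Python set of cells: its Lean value lists distinct elements.
def Pre_conway (activeSquares : List (List Int)) (iterations : Int) : Prop :=
  activeSquares.Nodup
instance (activeSquares : List (List Int)) (iterations : Int) : Decidable (Pre_conway activeSquares iterations) := by unfold Pre_conway; infer_instance

def pvWitness_conway : List (List Int) × Int := ([[0, 0], [0, 1], [0, 2]], 1)

def Spec_conway (activeSquares : List (List Int)) (iterations : Int) (out : Int) : Prop := out = conway_alt activeSquares iterations
instance (activeSquares : List (List Int)) (iterations : Int) (out : Int) : Decidable (Spec_conway activeSquares iterations out) := by unfold Spec_conway; infer_instance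

-- ===== CLAIM (what is proved, stated in full; the proofs are below) =====
def Claim_equal_conway : Prop := ∀ (activeSquares : List (List Int)) (iterations : Int), Dom_conway activeSquares iterations → Pre_conway activeSquares iterations → Spec_conway activeSquares iterations (conway activeSquares iterations)

-- ===== LEMMAS AND PROOFS =====

-- the full 3^d block of cells whose every coordinate is within 1 of the centre
def nbhdFull : List Int → List (List Int)
  | [] => [[]]
  | c :: l => ([c - 1, c, c + 1]).flatMap (fun i => (nbhdFull l).map (fun z => i :: z))

-- canonical neighbour count: how many active cells are adjacent to x
def cnt (active : List (List Int)) (x : List Int) : Nat :=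
  active.countP (fun sq => decide (x ∈ nbhdFull sq ∧ x ≠ sq))

theorem mem_nbhdFull_cons_cons (c d : Int) (l m : List Int) :
    d :: m ∈ nbhdFull (c :: l) ↔ (d = c - 1 ∨ d = c ∨ d = c + 1) ∧ m ∈ nbhdFull l := by
  simp only [nbhdFull, List.mem_flatMap, List.mem_map, List.mem_cons, List.not_mem_nil,
    or_false, List.cons.injEq]
  constructor
  · rintro ⟨i, hi, z, hz, rfl, rfl⟩
    exact ⟨by tauto, hz⟩
  · rintro ⟨hi, hz⟩
    exact ⟨d, by tauto, m, hz, rfl, rfl⟩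

theorem mem_nbhdFull_self (x : List Int) : x ∈ nbhdFull x := by
  induction x with
  | nil => simp [nbhdFull]
  | cons c l ih => exact (mem_nbhdFull_cons_cons c c l l).2 ⟨by omega, ih⟩

theorem mem_nbhdFull_symm (x y : List Int) : y ∈ nbhdFull x ↔ x ∈ nbhdFull y := by
  induction x generalizing y with
  | nil => cases y <;> simp [nbhdFull]
  | cons c l ih =>
    cases y with
    | nil => simp [nbhdFull]
    | cons d m =>
      rw [mem_nbhdFull_cons_cons, mem_nbhdFull_cons_cons, ih]
      constructor <;> rintro ⟨h1, h2⟩ <;> exact ⟨by omega, h2⟩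

theorem nodup_nbhdFull (x : List Int) : (nbhdFull x).Nodup := by
  induction x with
  | nil => simp [nbhdFull]
  | cons c l ih =>
    have hinj : ∀ i : Int, ((nbhdFull l).map (fun z => i :: z)).Nodup :=
      fun i => ih.map (fun a b h => by injection h)
    have hdisj : ∀ i j : Int, i ≠ j →
        List.Disjoint ((nbhdFull l).map (fun z => i :: z)) ((nbhdFull l).map (fun z => j :: z)) := by
      intro i j hij a ha hb
      simp only [List.mem_map] at ha hb
      obtain ⟨z, _, rfl⟩ := ha
      obtain ⟨w, _, hw⟩ := hb
      injection hw with h1 _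
      exact hij h1.symm
    simp only [nbhdFull, List.flatMap_cons, List.flatMap_nil, List.append_nil]
    refine (hinj _).append ((hinj _).append (hinj _) (hdisj _ _ (by omega))) ?_
    intro a ha hb
    rcases List.mem_append.1 hb with hb | hb
    · exact hdisj _ _ (by omega) ha hb
    · exact hdisj _ _ (by omega) ha hb

theorem foldl_cells (l : List Int) (init : List (List Int)) :
    l.foldl (fun cells c => cells.flatMap (fun p => [c - 1, c, c + 1].map (fun i => p ++ [i]))) init
      = init.flatMap (fun p => (nbhdFull l).map (fun z => p ++ z)) := by
  induction l generalizing init with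
  | nil => simp [nbhdFull]
  | cons c l ih =>
    rw [List.foldl_cons, ih, List.flatMap_assoc]
    congr 1
    funext p
    simp only [nbhdFull, List.flatMap_map, List.map_flatMap, List.map_map, Function.comp_def]
    refine List.flatMap_congr ?_
    intro i _
    refine List.map_congr_left ?_
    intro z _
    exact (List.append_cons p i z).symm

theorem cellsB_eq_nbhdFull (sq : List Int) : cellsB sq = nbhdFull sq := by
  unfold cellsB
  rw [foldl_cells]
  simp

-- Python's "for nb in neighbours.copy(): neighbours.remove(nb); neighbours += gen(nb)"
-- turns the list into its flatMap
theorem foldl_remove_flatMap {α : Type} [BEq α] [LawfulBEq α]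
    (gen : α → List α) (l : List α) : ∀ acc : List α,
    l.foldl (fun cur nb => ((PySem.List.remove? cur nb).getD cur) ++ gen nb) (l ++ acc)
      = acc ++ l.flatMap gen := by
  induction l with
  | nil => intro acc; simp
  | cons nb l ih =>
    intro acc
    rw [List.foldl_cons, List.cons_append, PySem.List.remove?_cons_self]
    simp only [Option.getD_some, List.flatMap_cons]
    rw [List.append_assoc, ih (acc ++ gen nb), List.append_assoc]

theorem pyRange_three (c : Int) :
    PySem.List.pyRange (c - 1) (c + 2) 1 = [c - 1, c, c + 1] := by
  rw [PySem.List.pyRange_one_cons (by omega), show c - 1 + 1 = c by ring,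
    PySem.List.pyRange_one_cons (by omega), PySem.List.pyRange_one_cons (by omega),
    PySem.List.pyRange_one_eq_nil (by omega)]

theorem foldl_congr_fun {α β : Type} (l : List α) (f g : β → α → β) (init : β)
    (h : ∀ b, ∀ a ∈ l, f b a = g b a) : l.foldl f init = l.foldl g init := by
  induction l generalizing init with
  | nil => rfl
  | cons a l ih =>
    rw [List.foldl_cons, List.foldl_cons, h init a (List.mem_cons_self ..)]
    exact ih _ (fun b a' ha' => h b a' (List.mem_cons_of_mem _ ha'))

theorem nbrsA_eq (sq : List Int) : nbrsA sq = (nbhdFull sq).erase sq := by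
  simp only [nbrsA]
  have e1 : List.foldl (fun nbs dim => List.foldl (fun cur nb =>
        ((PySem.List.remove? cur nb).getD cur)
          ++ (PySem.List.pyRange (PySem.List.pyGetD sq dim 0 - 1)
                (PySem.List.pyGetD sq dim 0 + 2) 1).map (fun i => nb ++ [i])) nbs nbs)
        [[]] (PySem.List.pyRange 0 (sq.length : Int) 1)
      = sq.foldl (fun nbs c => List.foldl (fun cur nb =>
          ((PySem.List.remove? cur nb).getD cur)
            ++ (PySem.List.pyRange (c - 1) (c + 2) 1).map (fun i => nb ++ [i])) nbs nbs) [[]] :=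
    PySem.List.foldl_pyRange_zero_pyGetD' sq 0
      (fun nbs c => List.foldl (fun cur nb =>
        ((PySem.List.remove? cur nb).getD cur)
          ++ (PySem.List.pyRange (c - 1) (c + 2) 1).map (fun i => nb ++ [i])) nbs nbs) [[]]
  rw [e1]
  have hfold : ∀ (acc : List (List Int)) (c : Int),
      acc.foldl (fun cur nb =>
        ((PySem.List.remove? cur nb).getD cur)
          ++ (PySem.List.pyRange (c - 1) (c + 2) 1).map (fun i => nb ++ [i])) acc
      = acc.flatMap (fun nb => [c - 1, c, c + 1].map (fun i => nb ++ [i])) := by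
    intro acc c
    have h0 := foldl_remove_flatMap
      (fun nb => (PySem.List.pyRange (c - 1) (c + 2) 1).map (fun i => nb ++ [i])) acc []
    rw [List.append_nil] at h0
    rw [h0, List.nil_append]
    refine List.flatMap_congr ?_
    intro nb _
    rw [pyRange_three]
  have hmain : sq.foldl (fun nbs c => nbs.foldl (fun cur nb =>
      ((PySem.List.remove? cur nb).getD cur)
        ++ (PySem.List.pyRange (c - 1) (c + 2) 1).map (fun i => nb ++ [i])) nbs) [[]]
      = nbhdFull sq := by
    rw [foldl_congr_fun _ _
      (fun cells c => cells.flatMap (fun p => [c - 1, c, c + 1].map (fun i => p ++ [i]))) _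
      (fun b a _ => hfold b a)]
    rw [foldl_cells]
    simp
  rw [hmain, PySem.List.remove?_eq_some_erase _ sq (mem_nbhdFull_self sq), Option.getD_some]

-- numNbrsA counts the active cells among x's distinct neighbours
theorem numNbrsA_eq_cnt (x : List Int) (act : List (List Int)) (h : act.Nodup) :
    numNbrsA x act = (cnt act x : Int) := by
  unfold numNbrsA
  rw [nbrsA_eq]
  have hc : ((nbhdFull x).erase x).foldl (fun n nb => if nb ∈ act then n + 1 else n) 0
      = (((nbhdFull x).erase x).countP (fun nb => decide (nb ∈ act)) : Int) := by
    have := PySem.List.foldl_count_if (fun nb => decide (nb ∈ act)) ((nbhdFull x).erase x) 0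
    simpa using this
  rw [hc]
  have hswap : ((nbhdFull x).erase x).countP (fun nb => decide (nb ∈ act))
      = act.countP (fun sq => decide (sq ∈ (nbhdFull x).erase x)) := by
    rw [List.countP_eq_length_filter, List.countP_eq_length_filter]
    apply List.Perm.length_eq
    refine (List.perm_ext_iff_of_nodup
      (((nodup_nbhdFull x).erase x).filter _) (h.filter _)).2 ?_
    intro a
    simp only [List.mem_filter, decide_eq_true_eq]
    tauto
  rw [hswap]
  unfold cnt
  congr 1
  apply List.countP_congr
  intro sq _
  simp only [decide_eq_true_eq]
  rw [List.Nodup.mem_erase_iff (nodup_nbhdFull x), mem_nbhdFull_symm x sq]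
  tauto

-- ==== stepB: the counter and its lookups ====

def bigL (act : List (List Int)) : List (List Int) :=
  act.flatMap (fun sq => (cellsB sq).filter (fun nb => decide (nb ≠ sq)))

theorem foldl_insert_if_eq_filter (sq : List Int) (l : List (List Int)) :
    ∀ d : PySem.Dict (List Int) Int,
    l.foldl (fun counts nb =>
        if nb ≠ sq then counts.insert nb (counts.getD nb 0 + 1) else counts) d
      = (l.filter (fun nb => decide (nb ≠ sq))).foldl
          (fun d x => d.insert x (d.getD x 0 + 1)) d := by
  induction l with
  | nil => intro d; rfl
  | cons nb l ih =>
    intro d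
    rw [List.foldl_cons, List.filter_cons]
    simp only [decide_eq_true_eq]
    by_cases h : nb ≠ sq
    · rw [if_pos h, if_pos h, List.foldl_cons]
      exact ih _
    · rw [if_neg h, if_neg h]
      exact ih _

theorem foldl_outer_eq (act : List (List Int)) : ∀ d : PySem.Dict (List Int) Int,
    act.foldl (fun counts sq =>
      (cellsB sq).foldl (fun counts nb =>
        if nb ≠ sq then counts.insert nb (counts.getD nb 0 + 1) else counts) counts) d
    = (bigL act).foldl (fun d x => d.insert x (d.getD x 0 + 1)) d := by
  unfold bigL
  induction act with
  | nil => intro d; rfl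
  | cons sq act ih =>
    intro d
    rw [List.foldl_cons, List.flatMap_cons, List.foldl_append, foldl_insert_if_eq_filter]
    exact ih _

theorem counts_eq_counter (act : List (List Int)) :
    act.foldl (fun counts sq =>
      (cellsB sq).foldl (fun counts nb =>
        if nb ≠ sq then counts.insert nb (counts.getD nb 0 + 1) else counts) counts)
      (PySem.Dict.empty : PySem.Dict (List Int) Int)
    = PySem.Dict.counter (bigL act) := by
  rw [foldl_outer_eq, PySem.Dict.foldl_insert_getD_add_one_eq_counter]

theorem count_bigL (act : List (List Int)) (x : List Int) :
    (bigL act).count x = cnt act x := by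
  induction act with
  | nil => simp [bigL, cnt]
  | cons sq act ih =>
    unfold bigL at *
    rw [List.flatMap_cons, List.count_append, ih]
    unfold cnt
    rw [List.countP_cons]
    have hone : ((cellsB sq).filter (fun nb => decide (nb ≠ sq))).count x
        = if x ∈ nbhdFull sq ∧ x ≠ sq then 1 else 0 := by
      have hnd : ((cellsB sq).filter (fun nb => decide (nb ≠ sq))).Nodup := by
        rw [cellsB_eq_nbhdFull]; exact (nodup_nbhdFull sq).filter _
      by_cases hx : x ∈ nbhdFull sq ∧ x ≠ sq
      · rw [if_pos hx]
        exact List.count_eq_one_of_mem hnd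
          (by rw [List.mem_filter, cellsB_eq_nbhdFull]; exact ⟨hx.1, by simpa using hx.2⟩)
      · rw [if_neg hx]
        apply List.count_eq_zero_of_not_mem
        rw [List.mem_filter, cellsB_eq_nbhdFull]
        simpa using fun h1 h2 => hx ⟨h1, h2⟩
    rw [hone]
    simp only [decide_eq_true_eq]
    omega

theorem mem_foldl_add_if {β α : Type} [BEq α] [LawfulBEq α]
    (l : List β) (p : β → Prop) [DecidablePred p] (f : β → α) (x : α) : ∀ s : PySem.Set α,
    x ∈ l.foldl (fun s b => if p b then PySem.Set.add s (f b) else s) s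
      ↔ x ∈ s ∨ ∃ b ∈ l, p b ∧ x = f b := by
  induction l with
  | nil => intro s; simp
  | cons b l ih =>
    intro s
    rw [List.foldl_cons, ih]
    by_cases hb : p b
    · rw [if_pos hb]
      rw [PySem.Set.mem_add]
      simp only [List.mem_cons]
      constructor
      · rintro (⟨h | h⟩ | ⟨b', hb', hpb', rfl⟩)
        · exact Or.inl h
        · exact Or.inr ⟨b, Or.inl rfl, hb, h⟩
        · exact Or.inr ⟨b', Or.inr hb', hpb', rfl⟩
      · rintro (h | ⟨b', hb' | hb', hpb', rfl⟩)
        · exact Or.inl (Or.inl h)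
        · subst hb'; exact Or.inl (Or.inr rfl)
        · exact Or.inr ⟨b', hb', hpb', rfl⟩
    · rw [if_neg hb]
      simp only [List.mem_cons]
      constructor
      · rintro (h | ⟨b', hb', hpb', rfl⟩)
        · exact Or.inl h
        · exact Or.inr ⟨b', Or.inr hb', hpb', rfl⟩
      · rintro (h | ⟨b', hb' | hb', hpb', rfl⟩)
        · exact Or.inl h
        · subst hb'; exact absurd hpb' hb
        · exact Or.inr ⟨b', hb', hpb', rfl⟩

theorem nodup_foldl_add_if {β α : Type} [BEq α] [LawfulBEq α]
    (l : List β) (p : β → Prop) [DecidablePred p] (f : β → α) : ∀ s : PySem.Set α,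
    s.Nodup → (l.foldl (fun s b => if p b then PySem.Set.add s (f b) else s) s).Nodup := by
  induction l with
  | nil => intro s h; simpa
  | cons b l ih =>
    intro s h
    rw [List.foldl_cons]
    by_cases hb : p b
    · rw [if_pos hb]; exact ih _ (PySem.Set.nodup_add _ _ h)
    · rw [if_neg hb]; exact ih _ h

theorem mem_bigL (act : List (List Int)) (x : List Int) :
    x ∈ bigL act ↔ ∃ sq ∈ act, x ∈ nbhdFull sq ∧ x ≠ sq := by
  unfold bigL
  simp [List.mem_flatMap, List.mem_filter, cellsB_eq_nbhdFull]

theorem mem_stepB (act : List (List Int)) (x : List Int) :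
    x ∈ stepB act ↔ (cnt act x = 3 ∨ (cnt act x = 2 ∧ x ∈ act)) := by
  unfold stepB
  rw [counts_eq_counter]
  rw [mem_foldl_add_if _ (fun kv : (List Int) × Int => kv.2 = 3 ∨ (kv.2 = 2 ∧ kv.1 ∈ act))
    (fun kv => kv.1) x PySem.Set.empty]
  simp only [PySem.Set.empty, List.not_mem_nil, false_or]
  rw [PySem.Dict.items_counter]
  constructor
  · rintro ⟨⟨k, v⟩, hkv, hcond, rfl⟩
    simp only [List.mem_map, Prod.mk.injEq] at hkv
    obtain ⟨k', _, rfl, rfl⟩ := hkv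
    rw [count_bigL] at hcond
    simp only at hcond
    rcases hcond with hc | ⟨hc, hmem⟩
    · left; exact_mod_cast hc
    · right; exact ⟨by exact_mod_cast hc, hmem⟩
  · intro hc
    have hpos : 0 < cnt act x := by omega
    have hx : x ∈ bigL act := by
      obtain ⟨sq, hsq, hp⟩ := List.countP_pos_iff.1 hpos
      simp only [decide_eq_true_eq] at hp
      exact (mem_bigL act x).2 ⟨sq, hsq, hp⟩
    refine ⟨(x, ((bigL act).count x : Int)), ?_, ?_, rfl⟩
    · exact List.mem_map.2 ⟨x, by rw [PySem.Set.mem_ofList]; exact hx, rfl⟩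
    · rw [count_bigL]
      simp only []
      rcases hc with hc | ⟨hc, hmem⟩
      · left; exact_mod_cast hc
      · right; exact ⟨by exact_mod_cast hc, hmem⟩

theorem nodup_stepB (act : List (List Int)) : (stepB act).Nodup := by
  unfold stepB
  exact nodup_foldl_add_if _ _ _ _ (by simp [PySem.Set.empty])

-- ==== stepA: membership characterisation ====

theorem mem_stepA_fold (act : List (List Int)) (rest : List (List Int)) (x : List Int) :
    ∀ s : PySem.Set (List Int),
    x ∈ rest.foldl (fun next square =>
        (nbrsA square).foldl (fun next nb =>
          if numNbrsA nb act = 3 then PySem.Set.add next nb else next)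
          (if numNbrsA square act = 2 ∨ numNbrsA square act = 3
            then PySem.Set.add next square else next)) s
      ↔ x ∈ s ∨ ∃ sq ∈ rest,
          (x = sq ∧ (numNbrsA sq act = 2 ∨ numNbrsA sq act = 3)) ∨
          (x ∈ nbrsA sq ∧ numNbrsA x act = 3) := by
  induction rest with
  | nil => intro s; simp
  | cons sq rest ih =>
    intro s
    simp only [List.foldl_cons]
    rw [ih]
    rw [mem_foldl_add_if (nbrsA sq) (fun nb => numNbrsA nb act = 3) (fun nb => nb) x]
    by_cases hc : numNbrsA sq act = 2 ∨ numNbrsA sq act = 3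
    · rw [if_pos hc, PySem.Set.mem_add]
      simp only [List.mem_cons]
      constructor
      · rintro (((h | hxe) | ⟨b, hb, h3, rfl⟩) | ⟨sq', hsq', hd⟩)
        · exact Or.inl h
        · exact Or.inr ⟨sq, Or.inl rfl, Or.inl ⟨hxe, hc⟩⟩
        · exact Or.inr ⟨sq, Or.inl rfl, Or.inr ⟨hb, h3⟩⟩
        · exact Or.inr ⟨sq', Or.inr hsq', hd⟩
      · rintro (h | ⟨sq', hsq' | hsq', hd⟩)
        · exact Or.inl (Or.inl (Or.inl h))
        · subst hsq'
          rcases hd with ⟨rfl, _⟩ | ⟨hnb, h3⟩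
          · exact Or.inl (Or.inl (Or.inr rfl))
          · exact Or.inl (Or.inr ⟨x, hnb, h3, rfl⟩)
        · exact Or.inr ⟨sq', hsq', hd⟩
    · rw [if_neg hc]
      simp only [List.mem_cons]
      constructor
      · rintro ((h | ⟨b, hb, h3, rfl⟩) | ⟨sq', hsq', hd⟩)
        · exact Or.inl h
        · exact Or.inr ⟨sq, Or.inl rfl, Or.inr ⟨hb, h3⟩⟩
        · exact Or.inr ⟨sq', Or.inr hsq', hd⟩
      · rintro (h | ⟨sq', hsq' | hsq', hd⟩)
        · exact Or.inl (Or.inl h)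
        · subst hsq'
          rcases hd with ⟨rfl, hn⟩ | ⟨hnb, h3⟩
          · exact absurd hn hc
          · exact Or.inl (Or.inr ⟨x, hnb, h3, rfl⟩)
        · exact Or.inr ⟨sq', hsq', hd⟩

theorem nodup_stepA_fold (act : List (List Int)) (rest : List (List Int)) :
    ∀ s : PySem.Set (List Int), s.Nodup →
    (rest.foldl (fun next square =>
        (nbrsA square).foldl (fun next nb =>
          if numNbrsA nb act = 3 then PySem.Set.add next nb else next)
          (if numNbrsA square act = 2 ∨ numNbrsA square act = 3
            then PySem.Set.add next square else next)) s).Nodup := by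
  induction rest with
  | nil => intro s h; simpa
  | cons sq rest ih =>
    intro s h
    simp only [List.foldl_cons]
    apply ih
    apply nodup_foldl_add_if (nbrsA sq) (fun nb => numNbrsA nb act = 3) (fun nb => nb)
    by_cases hc : numNbrsA sq act = 2 ∨ numNbrsA sq act = 3
    · rw [if_pos hc]; exact PySem.Set.nodup_add _ _ h
    · rw [if_neg hc]; exact h

theorem nodup_stepA (act : List (List Int)) : (stepA act).Nodup := by
  simp only [stepA]
  exact nodup_stepA_fold act act _ (by simp [PySem.Set.empty])

theorem mem_stepA (act : List (List Int)) (x : List Int) (h : act.Nodup) :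
    x ∈ stepA act ↔ (cnt act x = 3 ∨ (cnt act x = 2 ∧ x ∈ act)) := by
  simp only [stepA]
  rw [mem_stepA_fold act act x PySem.Set.empty]
  simp only [PySem.Set.empty, List.not_mem_nil, false_or]
  constructor
  · rintro ⟨sq, hsq, ⟨rfl, hn⟩ | ⟨hnb, hn⟩⟩
    · rw [numNbrsA_eq_cnt _ _ h] at hn
      rcases hn with hn | hn
      · right; exact ⟨by exact_mod_cast hn, hsq⟩
      · left; exact_mod_cast hn
    · left; rw [numNbrsA_eq_cnt _ _ h] at hn; exact_mod_cast hn
  · intro hc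
    rcases hc with hc | ⟨hc, hx⟩
    · have hpos : 0 < act.countP (fun sq => decide (x ∈ nbhdFull sq ∧ x ≠ sq)) := by
        unfold cnt at hc; omega
      obtain ⟨sq, hsq, hp⟩ := List.countP_pos_iff.1 hpos
      simp only [decide_eq_true_eq] at hp
      refine ⟨sq, hsq, Or.inr ⟨?_, ?_⟩⟩
      · rw [nbrsA_eq]
        exact (List.Nodup.mem_erase_iff (nodup_nbhdFull sq)).2 ⟨hp.2, hp.1⟩
      · rw [numNbrsA_eq_cnt _ _ h]; exact_mod_cast hc
    · exact ⟨x, hx, Or.inl ⟨rfl, Or.inl (by rw [numNbrsA_eq_cnt _ _ h]; exact_mod_cast hc)⟩⟩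

-- ==== the two loops agree ====

theorem loop_eq (n : Nat) : ∀ act act' : List (List Int),
    act.Nodup → act'.Nodup → act.Perm act' →
    (loopA n act).Perm (loopB n act') := by
  induction n with
  | zero => exact fun a b _ _ h3 => h3
  | succ n ih =>
    intro act act' h1 h2 h3
    have hstep : (stepA act).Perm (stepB act') := by
      refine (List.perm_ext_iff_of_nodup (nodup_stepA act) (nodup_stepB act')).2 ?_
      intro x
      rw [mem_stepA act x h1, mem_stepB act' x]
      have hcnt : cnt act x = cnt act' x := h3.countP_eq _
      have hmem : x ∈ act ↔ x ∈ act' := h3.mem_iff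
      rw [hcnt, hmem]
    exact ih (stepA act) (stepB act') (nodup_stepA act) (nodup_stepB act') hstep

-- ===== VERDICT (by name: the statement is the Claim_ definition above) =====
theorem conway_spec : Claim_equal_conway := by
  intro act it _ hpre
  unfold Spec_conway conway conway_alt
  rw [PySem.Set.ofList_eq_self_of_nodup act hpre]
  exact congrArg _ ((loop_eq it.toNat act act hpre hpre (List.Perm.refl _)).length_eq)
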